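-- pv_equiv track=rewrite | github.com/minasiankostas/WDP_CA | functions.py | getWDPCombinations
-- ===== SOURCE A (Python) =====
-- def getWDPCombinations(collection):
--     if len(collection) == 1:
--         yield [collection]
--         return
--
--     first = collection[0]
--     for less in getWDPCombinations(collection[1:]):
--         for k, subset in enumerate(less):
--             yield less[:k] + [[first] + subset] + less[k + 1:]
--         yield [[first]] + less
-- ===== SOURCE B (Python) =====
-- def getWDPCombinations(collection):
--     # Iterative right-fold instead of recursion: same expansion recurrence, same order.
--     partitions = [[[collection[-1]]]]
--     for x in reversed(collection[:-1]):
--         new = []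
--         for less in partitions:
--             for k in range(len(less)):
--                 new.append(less[:k] + [[x] + less[k]] + less[k + 1:])
--             new.append([[x]] + less)
--         partitions = new
--     yield from partitions
-- ===== Notes on version B (the rewrite author's own statement) =====
-- stated objective: alternative
-- what changed: Replaces the recursive generator (peel first element, recurse on the tail) by an explicit iterative fold: start from the singleton partition of the last element and rebuild the partition list while scanning the remaining elements right-to-left, yielding the finished list.
import Mathlib
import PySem

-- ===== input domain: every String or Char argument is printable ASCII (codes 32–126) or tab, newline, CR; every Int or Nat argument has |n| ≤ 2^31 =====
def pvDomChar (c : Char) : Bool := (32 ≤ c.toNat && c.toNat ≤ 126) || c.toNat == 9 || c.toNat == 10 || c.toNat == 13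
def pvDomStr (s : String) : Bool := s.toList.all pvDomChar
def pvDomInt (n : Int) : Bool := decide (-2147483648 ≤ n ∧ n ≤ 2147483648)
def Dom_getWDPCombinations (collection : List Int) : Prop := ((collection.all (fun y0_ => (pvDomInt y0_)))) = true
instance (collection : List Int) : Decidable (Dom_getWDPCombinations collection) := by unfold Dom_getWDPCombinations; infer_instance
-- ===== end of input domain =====

-- B replaces A's recursive generator by an iterative right-to-left fold; equivalence of the yielded partition lists is proved (both raise IndexError on []).

-- ===== PORT A =====
-- A's recursion: singleton base case, otherwise expand each partition of the tail with the
-- first element.  enumerate indices are nonnegative, so less[:k]/less[k+1:] are take/drop (exact).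
def getWDPCombinations : List Int → List (List (List Int))
  | [] => []            -- Python raises IndexError (collection[0]) here; excluded by Pre_
  | [c] => [[[c]]]
  | first :: rest =>
      (getWDPCombinations rest).flatMap (fun less =>
        ((PySem.List.enumerate less).map (fun p =>
          less.take p.1.toNat ++ ([first] ++ p.2) :: less.drop (p.1.toNat + 1)))
        ++ [[first] :: less])

-- ===== PORT B =====
-- one step of B's loop body: rebuild `new` from `partitions` for element x
-- (k ranges over 0..len(less)-1, so less[:k]/less[k]/less[k+1:] are take/getD/drop, exact)
def pvExpand (x : Int) (parts : List (List (List Int))) : List (List (List Int)) :=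
  parts.foldl (fun acc less =>
    ((List.range less.length).foldl
      (fun acc2 k => acc2 ++ [less.take k ++ ([x] ++ less.getD k []) :: less.drop (k + 1)]) acc)
    ++ [[x] :: less]) []

def getWDPCombinations_alt (collection : List Int) : List (List (List Int)) :=
  match collection.getLast? with
  | none => []          -- Python raises IndexError (collection[-1]) here; excluded by Pre_
  | some lastv => ((collection.dropLast).reverse).foldl (fun parts x => pvExpand x parts) [[[lastv]]]

-- ===== PRECONDITION & SPEC =====
-- Pre_ excludes only the empty list, on which both Pythons raise IndexError.
def Pre_getWDPCombinations (collection : List Int) : Prop := collection ≠ []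
instance (collection : List Int) : Decidable (Pre_getWDPCombinations collection) := by unfold Pre_getWDPCombinations; infer_instance
def pvWitness_getWDPCombinations : List Int := ([1, 2, 3])

def Spec_getWDPCombinations (collection : List Int) (out : List (List (List Int))) : Prop := out = getWDPCombinations_alt collection
instance (collection : List Int) (out : List (List (List Int))) : Decidable (Spec_getWDPCombinations collection out) := by unfold Spec_getWDPCombinations; infer_instance

-- ===== CLAIM (what is proved, stated in full; the proofs are below) =====
def Claim_equal_getWDPCombinations : Prop := ∀ (collection : List Int), Dom_getWDPCombinations collection → Pre_getWDPCombinations collection → Spec_getWDPCombinations collection (getWDPCombinations collection)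

-- ===== LEMMAS AND PROOFS =====

-- the two inner expansions of one partition `less` agree
theorem pv_inner_eq (x : Int) (less : List (List Int)) :
    (PySem.List.enumerate less).map (fun p =>
        less.take p.1.toNat ++ ([x] ++ p.2) :: less.drop (p.1.toNat + 1))
    = (List.range less.length).map (fun k =>
        less.take k ++ ([x] ++ less.getD k []) :: less.drop (k + 1)) := by
  apply List.ext_getElem
  · simp [PySem.List.length_enumerate]
  · intro k h1 h2
    simp [PySem.List.getElem_enumerate, List.getD_eq_getElem?_getD,
      List.getElem?_eq_getElem (by simpa [PySem.List.length_enumerate] using h1)]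

-- B's step equals a flatMap of A's per-partition expansion
theorem pvExpand_eq_flatMap (x : Int) (parts : List (List (List Int))) :
    pvExpand x parts = parts.flatMap (fun less =>
      ((PySem.List.enumerate less).map (fun p =>
        less.take p.1.toNat ++ ([x] ++ p.2) :: less.drop (p.1.toNat + 1)))
      ++ [[x] :: less]) := by
  unfold pvExpand
  rw [show (fun (acc : List (List (List Int))) (less : List (List Int)) =>
      ((List.range less.length).foldl
        (fun acc2 k => acc2 ++ [less.take k ++ ([x] ++ less.getD k []) :: less.drop (k + 1)]) acc)
      ++ [[x] :: less])
    = (fun acc less => acc ++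
        (((PySem.List.enumerate less).map (fun p =>
          less.take p.1.toNat ++ ([x] ++ p.2) :: less.drop (p.1.toNat + 1)))
        ++ [[x] :: less])) from ?_]
  · rw [PySem.List.foldl_append_eq_flatMap]
    simp
  · funext acc less
    rw [PySem.List.foldl_append_singleton_eq_map, pv_inner_eq, List.append_assoc]

-- A's recursion step, for nonempty tail
theorem pvA_cons (first : Int) (rest : List Int) (h : rest ≠ []) :
    getWDPCombinations (first :: rest) = pvExpand first (getWDPCombinations rest) := by
  rw [pvExpand_eq_flatMap]
  match rest, h with
  | r :: rs, _ => rfl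

-- main equivalence, on nonempty input
theorem pv_main (collection : List Int) (h : collection ≠ []) :
    getWDPCombinations collection = getWDPCombinations_alt collection := by
  induction collection with
  | nil => exact absurd rfl h
  | cons x rest ih =>
    cases rest with
    | nil => rfl
    | cons r rs =>
      have hr : (r :: rs : List Int) ≠ [] := by simp
      rw [pvA_cons x (r :: rs) hr, ih hr]
      unfold getWDPCombinations_alt
      have hlast : (x :: r :: rs).getLast? = (r :: rs).getLast? := by
        simp [List.getLast?_cons_cons]
      obtain ⟨lv, hlv⟩ : ∃ lv, (r :: rs).getLast? = some lv := by
        cases hE : (r :: rs).getLast? with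
        | none => simp at hE
        | some v => exact ⟨v, rfl⟩
      rw [hlast, hlv]
      have hdl : (x :: r :: rs).dropLast = x :: (r :: rs).dropLast := by
        simp [List.dropLast_cons_of_ne_nil]
      rw [hdl]
      simp [List.reverse_cons, List.foldl_append]

-- ===== VERDICT (by name: the statement is the Claim_ definition above) =====
theorem getWDPCombinations_spec : Claim_equal_getWDPCombinations := by
  intro collection _ hpre
  exact pv_main collection hpre
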